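-- pv_equiv track=rewrite | github.com/AlexanderTankov/HackBulgaria-Programming-101 | Week 0 Part 2/10-member_of_nth_fib_lists.py | nth_fib_lists
-- ===== SOURCE A (Python) =====
-- def nth_fib_lists(listA, listB, n):
--     if listA == [] and listB == []:
--         return []
--     if n == 0:
--         return []
--     elif n == 1:
--         return listA
--     elif n == 2:
--         return listB
--     else:
--         return nth_fib_lists(listA, listB, n - 2) + nth_fib_lists(listA, listB, n - 1)
-- ===== SOURCE B (Python) =====
-- def nth_fib_lists(listA, listB, n):
--     if n <= 0:
--         return []
--     if n == 1:
--         return listA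
--     prev, cur = listA, listB
--     for _ in range(n - 2):
--         prev, cur = cur, prev + cur
--     return cur
-- ===== Notes on version B (the rewrite author's own statement) =====
-- stated objective: alternative
-- what changed: Replaces the naive double recursion (which recomputes every smaller term) with an iterative bottom-up pass keeping only the previous two lists.
import Mathlib
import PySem

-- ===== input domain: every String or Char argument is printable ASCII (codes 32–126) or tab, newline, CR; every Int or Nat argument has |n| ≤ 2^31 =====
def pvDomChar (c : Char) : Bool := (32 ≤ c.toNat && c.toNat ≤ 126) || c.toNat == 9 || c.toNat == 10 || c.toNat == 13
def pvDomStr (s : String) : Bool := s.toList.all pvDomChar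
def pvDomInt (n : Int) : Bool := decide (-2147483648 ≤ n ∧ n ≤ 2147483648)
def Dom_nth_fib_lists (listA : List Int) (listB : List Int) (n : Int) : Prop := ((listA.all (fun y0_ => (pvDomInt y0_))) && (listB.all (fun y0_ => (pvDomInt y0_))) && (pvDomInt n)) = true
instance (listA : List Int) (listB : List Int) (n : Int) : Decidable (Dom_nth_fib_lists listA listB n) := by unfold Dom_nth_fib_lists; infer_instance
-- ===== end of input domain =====

-- B replaces A's double recursion by an iterative bottom-up pass that keeps
-- only the previous two lists (objective: alternative).

-- ===== PORT A =====
-- The final `if n < 0 then []` branch marks where Python A recurses forever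
-- (RecursionError); Pre_ excludes those inputs, so nothing is claimed there.
def nth_fib_lists (listA : List Int) (listB : List Int) (n : Int) : List Int :=
  if listA = [] ∧ listB = [] then []
  else if n = 0 then []
  else if n = 1 then listA
  else if n = 2 then listB
  else if n < 0 then []
  else nth_fib_lists listA listB (n - 2) ++ nth_fib_lists listA listB (n - 1)
termination_by n.toNat
decreasing_by all_goals omega

-- ===== PORT B =====
def nth_fib_lists_alt (listA : List Int) (listB : List Int) (n : Int) : List Int :=
  if n ≤ 0 then []
  else if n = 1 then listA
  else
    ((List.range (n - 2).toNat).foldl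
      (fun (pc : List Int × List Int) _ => (pc.2, pc.1 ++ pc.2)) (listA, listB)).2

-- ===== PRECONDITION & SPEC =====
-- Pre_ excludes inputs where Python A raises RecursionError: n < 0 with a
-- non-empty list (no base case is ever reached), and n > 1000 with a non-empty
-- list (A's recursion depth grows like n and exceeds CPython's default
-- recursion limit of 1000 before it could return).
def Pre_nth_fib_lists (listA : List Int) (listB : List Int) (n : Int) : Prop :=
  (listA = [] ∧ listB = []) ∨ (0 ≤ n ∧ n ≤ 1000)
instance (listA : List Int) (listB : List Int) (n : Int) : Decidable (Pre_nth_fib_lists listA listB n) := by unfold Pre_nth_fib_lists; infer_instance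
def pvWitness_nth_fib_lists : List Int × List Int × Int := ([1, 2], [3], 5)

def Spec_nth_fib_lists (listA : List Int) (listB : List Int) (n : Int) (out : List Int) : Prop := out = nth_fib_lists_alt listA listB n
instance (listA : List Int) (listB : List Int) (n : Int) (out : List Int) : Decidable (Spec_nth_fib_lists listA listB n out) := by unfold Spec_nth_fib_lists; infer_instance

-- ===== CLAIM (what is proved, stated in full; the proofs are below) =====
def Claim_equal_nth_fib_lists : Prop := ∀ (listA : List Int) (listB : List Int) (n : Int), Dom_nth_fib_lists listA listB n → Pre_nth_fib_lists listA listB n → Spec_nth_fib_lists listA listB n (nth_fib_lists listA listB n)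

-- ===== LEMMAS AND PROOFS =====

-- B's loop state after k iterations, as a function of k.
def fibPairs (listA listB : List Int) : Nat → List Int × List Int
  | 0 => (listA, listB)
  | k + 1 => ((fibPairs listA listB k).2, (fibPairs listA listB k).1 ++ (fibPairs listA listB k).2)

lemma foldl_range_fibPairs (listA listB : List Int) (k : Nat) :
    (List.range k).foldl (fun (pc : List Int × List Int) _ => (pc.2, pc.1 ++ pc.2)) (listA, listB)
      = fibPairs listA listB k := by
  induction k with
  | zero => rfl
  | succ k ih =>
      rw [List.range_succ, List.foldl_append, ih]
      rfl

lemma fibPairs_nil (k : Nat) : fibPairs [] [] k = ([], []) := by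
  induction k with
  | zero => rfl
  | succ k ih => simp [fibPairs, ih]

-- A on nonempty input computes exactly B's loop state.
lemma A_eq_fibPairs (listA listB : List Int) (h : ¬(listA = [] ∧ listB = [])) (k : Nat) :
    nth_fib_lists listA listB ((k : Int) + 1) = (fibPairs listA listB k).1 ∧
    nth_fib_lists listA listB ((k : Int) + 2) = (fibPairs listA listB k).2 := by
  induction k with
  | zero =>
      constructor <;> (rw [nth_fib_lists]; simp [h, fibPairs])
  | succ k ih =>
      obtain ⟨ih1, ih2⟩ := ih
      push_cast
      refine ⟨by rw [show ((k : Int) + 1 + 1) = (k : Int) + 2 by ring, ih2]; rfl, ?_⟩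
      rw [show ((k : Int) + 1 + 2) = (k : Int) + 3 by ring]
      rw [nth_fib_lists]
      have h0 : ¬((k : Int) + 3 = 0) := by omega
      have h1 : ¬((k : Int) + 3 = 1) := by omega
      have h2 : ¬((k : Int) + 3 = 2) := by omega
      have h3 : ¬((k : Int) + 3 < 0) := by omega
      simp only [h, h0, h1, h2, h3, if_false]
      rw [show ((k : Int) + 3 - 2) = (k : Int) + 1 by ring,
          show ((k : Int) + 3 - 1) = (k : Int) + 2 by ring, ih1, ih2]
      rfl

-- ===== VERDICT (by name: the statement is the Claim_ definition above) =====
theorem nth_fib_lists_spec : Claim_equal_nth_fib_lists := by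
  intro listA listB n _ hpre
  unfold Spec_nth_fib_lists nth_fib_lists_alt
  by_cases hnil : listA = [] ∧ listB = []
  · obtain ⟨ha, hb⟩ := hnil
    subst ha; subst hb
    have hA : nth_fib_lists [] [] n = [] := by rw [nth_fib_lists]; simp
    rw [hA]
    split_ifs with h1 h2
    · rfl
    · rfl
    · rw [foldl_range_fibPairs, fibPairs_nil]
  · rcases hpre with hnil' | ⟨hn, _⟩
    · exact absurd hnil' hnil
    · by_cases h0 : n = 0
      · subst h0; rw [nth_fib_lists]; simp [hnil]
      · by_cases h1 : n = 1
        · subst h1; rw [nth_fib_lists]; simp [hnil]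
        · have h2 : 2 ≤ n := by omega
          obtain ⟨k, rfl⟩ : ∃ k : Nat, n = (k : Int) + 2 := ⟨(n - 2).toNat, by omega⟩
          have hA := (A_eq_fibPairs listA listB hnil k).2
          rw [hA, if_neg (by omega : ¬((k : Int) + 2 ≤ 0)), if_neg (by omega : ¬((k : Int) + 2 = 1))]
          rw [show ((k : Int) + 2 - 2) = (k : Int) by ring, Int.toNat_natCast,
              foldl_range_fibPairs]
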